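-- pv_equiv track=rewrite | github.com/Shiqi17777-rsq/ransebao-product-studio | engine/core/config.py | _normalize_account_name
-- ===== SOURCE A (Python) =====
-- from typing import Any
--
-- def _normalize_account_name(value: Any) -> str:
--     raw = str(value or "").strip()
--     if not raw:
--         return ""
--     allowed = []
--     for char in raw:
--         if char.isalnum() or char in {"-", "_"}:
--             allowed.append(char.lower())
--         elif char in {" ", "."}:
--             allowed.append("-")
--     normalized = "".join(allowed).strip("-_")
--     while "--" in normalized:
--         normalized = normalized.replace("--", "-")
--     return normalized
-- ===== SOURCE B (Python) =====
-- from typing import Any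
--
-- def _normalize_account_name(value: Any) -> str:
--     raw = str(value or "").strip()
--     out = []
--     pending = False  # a separator run seen since the last kept character
--     for char in raw:
--         if char.isalnum() or char == "_":
--             if pending and out:
--                 out.append("-")
--             out.append(char.lower())
--             pending = False
--         elif char in "-. ":
--             pending = True
--     return "".join(out).strip("-_")
-- ===== Notes on version B (the rewrite author's own statement) =====
-- stated objective: alternative
-- what changed: A builds the kept characters, strips dash/underscore off the ends, then repeatedly rescans the string replacing double dashes until none remain; B does a single pass with a pending-separator flag that emits at most one dash between kept characters (no replace loop, no repeated scans), followed by one final edge strip.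
import Mathlib
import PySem

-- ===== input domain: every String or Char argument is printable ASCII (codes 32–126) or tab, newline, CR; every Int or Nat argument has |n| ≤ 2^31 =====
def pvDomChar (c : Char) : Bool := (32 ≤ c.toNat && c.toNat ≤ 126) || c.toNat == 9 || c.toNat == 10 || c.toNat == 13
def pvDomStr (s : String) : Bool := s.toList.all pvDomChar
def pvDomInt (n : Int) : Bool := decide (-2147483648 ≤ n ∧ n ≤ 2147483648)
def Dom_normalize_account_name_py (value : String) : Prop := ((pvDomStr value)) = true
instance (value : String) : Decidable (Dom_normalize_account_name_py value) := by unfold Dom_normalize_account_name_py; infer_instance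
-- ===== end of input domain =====

-- B replaces A's build-then-strip-then-while-replace pipeline by a single pass with a pending-separator
-- flag (no replace loop); same return value (no side effects involved).

-- ===== PORT A =====
-- the 'while "--" in normalized' loop; fuel = normalized.length makes it total (each
-- iteration of Python's loop strictly shortens the string, so the fuel is never exhausted)
def pvCollapse : Nat → List Char → List Char
  | 0, s => s
  | fuel + 1, s =>
    if PySem.Chars.isIn ['-', '-'] s then
      pvCollapse fuel (PySem.Chars.replace s ['-', '-'] ['-'])
    else s

def normalize_account_name_py (value : String) : String :=
  -- str(value or "") is the identity on the String domain ("" stays "")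
  let raw := PySem.Chars.strip value.toList
  if raw.isEmpty then "" else
  -- for char in raw: append char.lower() / '-' / nothing   ("".join kept as the char list itself)
  let allowed := raw.foldl (fun acc c =>
    if PySem.Chars.isalnum c || c == '-' || c == '_' then acc ++ [PySem.Chars.lowerChar c]
    else if c == ' ' || c == '.' then acc ++ ['-'] else acc) []
  let normalized := PySem.Chars.stripChars allowed ['-', '_']
  String.ofList (pvCollapse normalized.length normalized)

-- ===== PORT B =====
def normalize_account_name_py_alt (value : String) : String :=
  let raw := PySem.Chars.strip value.toList
  -- state: (out, pending); one pass over raw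
  let st := raw.foldl (fun (st : List Char × Bool) c =>
    if PySem.Chars.isalnum c || c == '_' then
      ((if st.2 && !st.1.isEmpty then st.1 ++ ['-'] else st.1) ++ [PySem.Chars.lowerChar c], false)
    else if c == '-' || c == '.' || c == ' ' then (st.1, true)
    else st) ([], false)
  String.ofList (PySem.Chars.stripChars st.1 ['-', '_'])

-- ===== PRECONDITION & SPEC =====
def Spec_normalize_account_name_py (value : String) (out : String) : Prop := out = normalize_account_name_py_alt value
instance (value : String) (out : String) : Decidable (Spec_normalize_account_name_py value out) := by unfold Spec_normalize_account_name_py; infer_instance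

-- ===== CLAIM (what is proved, stated in full; the proofs are below) =====
def Claim_equal_normalize_account_name_py : Prop := ∀ (value : String), Dom_normalize_account_name_py value → Spec_normalize_account_name_py value (normalize_account_name_py value)

-- ===== LEMMAS AND PROOFS =====

-- the strip-set {'-','_'} as a predicate
def pvInD (c : Char) : Bool := c == '-' || c == '_'

-- per-character contribution of A's for-loop
def pvFA (c : Char) : List Char :=
  if PySem.Chars.isalnum c || c == '-' || c == '_' then [PySem.Chars.lowerChar c]
  else if c == ' ' || c == '.' then ['-'] else []

-- '--' occurs as a substring
def pvHasDD : List Char → Bool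
  | [] => false
  | c :: t => (c == '-' && t.head? == some '-') || pvHasDD t

-- one pass of s.replace("--", "-") (left-to-right, non-overlapping)
def pvRepl2 : List Char → List Char
  | [] => []
  | [c] => [c]
  | c :: d :: t => if c == '-' && d == '-' then '-' :: pvRepl2 t else c :: pvRepl2 (d :: t)

-- collapse every run of dashes to a single dash (fixpoint of pvRepl2)
def pvSqueeze : List Char → List Char
  | [] => []
  | c :: t => if c == '-' && t.head? == some '-' then pvSqueeze t else c :: pvSqueeze t

-- right strip of the '-'/'_' suffix, as a left-to-right recursion
def pvRstrip : List Char → List Char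
  | [] => []
  | c :: t => if pvInD c && (pvRstrip t).isEmpty then [] else c :: pvRstrip t

-- strip('-_') of a char list
def pvStripD (s : List Char) : List Char := pvRstrip (List.dropWhile pvInD s)

-- drop one leading dash
def pvDropLead : List Char → List Char
  | [] => []
  | c :: t => if c == '-' then t else c :: t

-- prepend a dash unless empty or already dash-headed
def pvConsDash (s : List Char) : List Char :=
  if s.isEmpty then [] else if s.head? == some '-' then s else '-' :: s

-- B's machine on the raw characters: ne = "out is nonempty", pd = pending
def pvS : Bool → Bool → List Char → List Char
  | _, _, [] => []
  | ne, pd, c :: t =>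
    if PySem.Chars.isalnum c || c == '_' then
      (if pd && ne then ['-'] else []) ++ PySem.Chars.lowerChar c :: pvS true false t
    else if c == '-' || c == '.' || c == ' ' then pvS ne true t
    else pvS ne pd t

-- the same machine expressed on the image g = raw.flatMap pvFA
def pvS' : Bool → Bool → List Char → List Char
  | _, _, [] => []
  | ne, pd, c :: t =>
    if c == '-' then pvS' ne true t
    else (if pd && ne then ['-'] else []) ++ c :: pvS' true false t

theorem pv_foldlA (l : List Char) (acc : List Char) :
    l.foldl (fun acc c =>
      if PySem.Chars.isalnum c || c == '-' || c == '_' then acc ++ [PySem.Chars.lowerChar c]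
      else if c == ' ' || c == '.' then acc ++ ['-'] else acc) acc = acc ++ l.flatMap pvFA := by
  induction l generalizing acc with
  | nil => simp
  | cons c t ih =>
    simp only [List.foldl_cons, List.flatMap_cons, ih, pvFA]
    split <;> [skip; split] <;> simp


theorem pv_machine (l : List Char) (out : List Char) (pd : Bool) :
    (l.foldl (fun (st : List Char × Bool) c =>
      if PySem.Chars.isalnum c || c == '_' then
        ((if st.2 && !st.1.isEmpty then st.1 ++ ['-'] else st.1) ++ [PySem.Chars.lowerChar c], false)
      else if c == '-' || c == '.' || c == ' ' then (st.1, true)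
      else st) (out, pd)).1 = out ++ pvS (!out.isEmpty) pd l := by
  induction l generalizing out pd with
  | nil => simp [pvS]
  | cons c t ih =>
    simp only [List.foldl_cons, pvS]
    by_cases h1 : (PySem.Chars.isalnum c || c == '_') = true
    · simp only [h1, if_pos]
      rw [ih]
      have hne : ((if pd && !out.isEmpty then out ++ ['-'] else out) ++ [PySem.Chars.lowerChar c]).isEmpty = false := by
        split <;> simp
      rw [hne]
      cases hpd : pd && !out.isEmpty <;> simp_all
    · simp only [h1, if_neg, Bool.not_eq_true]
      by_cases h2 : (c == '-' || c == '.' || c == ' ') = true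
      · simp only [h2, if_pos, ih]
      · simp only [h2, if_neg, Bool.not_eq_true, ih]


theorem pvLower_ne (c : Char) (h : (PySem.Chars.isalnum c || c == '_') = true) :
    (PySem.Chars.lowerChar c == '-') = false := by
  simp only [PySem.Chars.isalnum, PySem.Chars.isalpha, PySem.Chars.isdigit,
    PySem.Chars.isupper, PySem.Chars.islower, Bool.or_eq_true, Bool.and_eq_true,
    decide_eq_true_eq, beq_iff_eq] at h
  have hval : ∀ a b : Char, a ≤ b → a.toNat ≤ b.toNat := fun a b hab => hab
  have eA : ('A' : Char).toNat = 65 := rfl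
  have eZ : ('Z' : Char).toNat = 90 := rfl
  have eD : ('-' : Char).toNat = 45 := rfl
  simp only [PySem.Chars.lowerChar, PySem.Chars.isupper, beq_eq_false_iff_ne]
  split
  case isTrue hu =>
    simp only [Bool.and_eq_true, decide_eq_true_eq] at hu
    have h1 := hval _ _ hu.1
    have h2 := hval _ _ hu.2
    rw [eA] at h1; rw [eZ] at h2
    intro hEq
    have h3 : (Char.ofNat (c.toNat + 32)).toNat = c.toNat + 32 := by
      simp only [Char.toNat_ofNat]
      split <;> [rfl; omega]
    rw [hEq, eD] at h3
    omega
  case isFalse hu =>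
    intro hEq
    subst hEq
    revert h
    decide


theorem pvS_eq (l : List Char) (ne pd : Bool) : pvS ne pd l = pvS' ne pd (l.flatMap pvFA) := by
  induction l generalizing ne pd with
  | nil => rfl
  | cons c t ih =>
    simp only [List.flatMap_cons, pvS]
    by_cases h1 : (PySem.Chars.isalnum c || c == '_') = true
    · have hFA : pvFA c = [PySem.Chars.lowerChar c] := by
        rcases Bool.or_eq_true_iff.1 h1 with h | h
        · simp [pvFA, h]
        · simp [pvFA, h]
      rw [hFA, if_pos h1]
      simp only [List.cons_append, List.nil_append, pvS', pvLower_ne c h1]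
      simp only [Bool.false_eq_true, if_false, ih]
    · rw [if_neg (by simp_all)]
      simp only [Bool.or_eq_true, beq_iff_eq] at h1
      push Not at h1
      by_cases h2 : (c == '-' || c == '.' || c == ' ') = true
      · have hFA : pvFA c = ['-'] := by
          rcases Bool.or_eq_true_iff.1 h2 with h | h
          · rcases Bool.or_eq_true_iff.1 h with h | h
            · have : c = '-' := by simpa using h
              subst this; rfl
            · have : c = '.' := by simpa using h
              subst this
              decide
          · have : c = ' ' := by simpa using h
            subst this
            decide
        rw [if_pos h2, hFA]
        simp only [List.singleton_append, pvS']
        simp only [beq_self_eq_true, if_true, ih]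
      · have hFA : pvFA c = [] := by
          simp only [Bool.or_eq_true, beq_iff_eq] at h2
          push Not at h2
          simp [pvFA, h1.1, h1.2, h2.1.1, h2.1.2, h2.2,
            Bool.or_eq_true, beq_iff_eq]
        rw [if_neg h2, hFA, List.nil_append, ih]


theorem pvS'_false (t : List Char) (pd pd' : Bool) : pvS' false pd t = pvS' false pd' t := by
  induction t generalizing pd pd' with
  | nil => rfl
  | cons c t ih =>
    simp only [pvS']
    split
    · exact ih true true
    · simp


theorem pvStripD_cons_inD (c : Char) (s : List Char) (h : pvInD c = true) :
    pvStripD (c :: s) = pvStripD s := by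
  simp [pvStripD, h]


theorem pvStripD_cons_notD (c : Char) (s : List Char) (h : pvInD c = false) :
    pvStripD (c :: s) = c :: pvRstrip s := by
  simp [pvStripD, h, pvRstrip]


theorem pvL2 (t : List Char) (pd : Bool) :
    pvStripD (pvS' true pd t) = pvStripD (pvS' false false t) := by
  induction t generalizing pd with
  | nil => rfl
  | cons c t ih =>
    simp only [pvS']
    by_cases hc : (c == '-') = true
    · rw [if_pos hc, if_pos hc]
      rw [ih true]
      rw [pvS'_false t true false]
    · rw [if_neg hc, if_neg hc]
      simp only [Bool.and_true, Bool.and_false, Bool.false_eq_true, if_false, List.nil_append]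
      cases pd
      · simp
      · simp only [if_true]
        exact pvStripD_cons_inD '-' _ (by decide)


theorem pvSqueeze_nil_iff (s : List Char) : pvSqueeze s = [] ↔ s = [] := by
  constructor
  · intro h
    induction s with
    | nil => rfl
    | cons c t ih =>
      simp only [pvSqueeze] at h
      split at h
      · next hc =>
        cases t with
        | nil => simp at hc
        | cons d u => simp_all [pvSqueeze]
      · simp at h
  · rintro rfl; rfl


theorem pvSqueeze_cons_ne (c : Char) (s : List Char) (h : (c == '-') = false) :
    pvSqueeze (c :: s) = c :: pvSqueeze s := by
  cases s with
  | nil => simp [pvSqueeze]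
  | cons d u => simp [pvSqueeze, h]


theorem pvSqueeze_dash (s : List Char) : pvSqueeze ('-' :: s) = '-' :: pvDropLead (pvSqueeze s) := by
  induction s with
  | nil => simp [pvSqueeze, pvDropLead]
  | cons c t ih =>
    by_cases hc : c = '-'
    · subst hc
      have h1 : pvSqueeze ('-' :: '-' :: t) = pvSqueeze ('-' :: t) := by
        simp [pvSqueeze]
      rw [h1, ih]
      cases h2 : pvSqueeze t with
      | nil => simp [pvDropLead]
      | cons e u =>
        by_cases he : e = '-' <;> simp [pvDropLead, he]
    · have h1 : pvSqueeze ('-' :: c :: t) = '-' :: pvSqueeze (c :: t) := by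
        simp [pvSqueeze, hc]
      rw [h1, pvSqueeze_cons_ne c t (by simp [hc])]
      simp [pvDropLead, hc]


theorem pvRstrip_cons (c : Char) (s : List Char) :
    pvRstrip (c :: s) = if pvInD c && (pvRstrip s).isEmpty then [] else c :: pvRstrip s := by
  simp [pvRstrip]

theorem pvM2 (t : List Char) (pd : Bool) :
    pvRstrip (pvS' true pd t) =
      (if pd then pvConsDash (pvSqueeze (pvRstrip t)) else pvSqueeze (pvRstrip t)) := by
  induction t generalizing pd with
  | nil => cases pd <;> simp [pvS', pvRstrip, pvSqueeze, pvConsDash]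
  | cons c t ih =>
    have hcd : ∀ s : List Char, s ≠ [] → pvConsDash s = '-' :: pvDropLead s := by
      intro s hs
      cases s with
      | nil => simp at hs
      | cons e u =>
        by_cases he : (e == '-') = true
        · have : e = '-' := by simpa using he
          subst this
          simp [pvConsDash, pvDropLead]
        · simp [pvConsDash, pvDropLead, he]
    simp only [pvS']
    by_cases hc : (c == '-') = true
    · have hc' : c = '-' := by simpa using hc
      subst hc'
      rw [if_pos (by decide)]
      rw [ih true, if_pos rfl]
      have hr : pvRstrip ('-' :: t) = if (pvRstrip t).isEmpty then [] else '-' :: pvRstrip t := by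
        simp [pvRstrip, pvInD]
      cases hre : (pvRstrip t).isEmpty
      · have hne : pvRstrip t ≠ [] := by simpa using hre
        rw [hr, hre]
        simp only [Bool.false_eq_true, if_false]
        rw [pvSqueeze_dash]
        have hq : pvSqueeze (pvRstrip t) ≠ [] := by
          simpa [pvSqueeze_nil_iff]
        rw [hcd _ hq]
        cases pd
        · simp
        · simp only [if_true]
          rw [hcd ('-' :: pvDropLead (pvSqueeze (pvRstrip t))) (by simp)]
          simp [pvDropLead]
      · have : pvRstrip t = [] := by simpa using hre
        rw [hr, hre, this]
        cases pd <;> simp [pvSqueeze, pvConsDash]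
    · rw [if_neg hc]
      have hX := ih false
      simp only [Bool.false_eq_true, if_false] at hX
      have hrc : pvRstrip (c :: t) = if pvInD c && (pvRstrip t).isEmpty then [] else c :: pvRstrip t := by
        simp [pvRstrip]
      by_cases hA : pvInD c = true ∧ pvRstrip t = []
      · have hq : pvSqueeze (pvRstrip t) = [] := by rw [hA.2]; rfl
        have h1 : pvRstrip (c :: pvS' true false t) = [] := by
          rw [pvRstrip_cons, hX, hq, hA.1]
          rfl
        have h2 : pvRstrip (c :: t) = [] := by
          simp [hrc, hA.1, hA.2]
        cases pd
        · simp only [Bool.false_and, Bool.false_eq_true, if_false, List.nil_append]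
          rw [h1, h2]
          rfl
        · simp only [Bool.and_self, if_true, List.singleton_append]
          have h3 : pvRstrip ('-' :: c :: pvS' true false t) = [] := by
            rw [pvRstrip_cons, h1]
            rfl
          rw [h3, h2]
          rfl
      · have hq : pvSqueeze (pvRstrip (c :: t)) = c :: pvSqueeze (pvRstrip t) := by
          have h2 : pvRstrip (c :: t) = c :: pvRstrip t := by
            rw [hrc, if_neg]
            intro hcon
            simp only [Bool.and_eq_true, List.isEmpty_iff] at hcon
            exact hA ⟨hcon.1, hcon.2⟩
          rw [h2, pvSqueeze_cons_ne c _ (by simpa using hc)]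
        have h1 : pvRstrip (c :: pvS' true false t) = c :: pvSqueeze (pvRstrip t) := by
          rw [pvRstrip_cons, hX, if_neg]
          intro hcon
          simp only [Bool.and_eq_true, List.isEmpty_iff, pvSqueeze_nil_iff] at hcon
          exact hA ⟨hcon.1, hcon.2⟩
        cases pd
        · simpa only [Bool.false_and, Bool.false_eq_true, if_false, List.nil_append, hq] using h1
        · simp only [Bool.and_self, if_true, List.singleton_append, hq]
          have : pvRstrip ('-' :: c :: pvS' true false t) = '-' :: c :: pvSqueeze (pvRstrip t) := by
            rw [pvRstrip_cons, h1]
            rfl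
          rw [this, hcd _ (by simp)]
          simp [pvDropLead, (by simpa using hc : (c == '-') = false)]


theorem pvM (g : List Char) : pvStripD (pvS' false false g) = pvSqueeze (pvStripD g) := by
  induction g with
  | nil => rfl
  | cons c t ih =>
    simp only [pvS']
    by_cases hc : (c == '-') = true
    · have hc' : c = '-' := by simpa using hc
      subst hc'
      rw [if_pos (by decide)]
      rw [pvS'_false t true false, ih]
      rw [pvStripD_cons_inD '-' t (by decide)]
    · rw [if_neg hc]
      simp only [Bool.false_and, Bool.false_eq_true, if_false, List.nil_append]
      by_cases hd : pvInD c = true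
      · rw [pvStripD_cons_inD c _ hd, pvL2, ih, pvStripD_cons_inD c t hd]
      · have hd' : pvInD c = false := by simpa using hd
        rw [pvStripD_cons_notD c _ hd']
        have := pvM2 t false
        simp only [Bool.false_eq_true, if_false] at this
        rw [this]
        rw [pvStripD_cons_notD c t hd', pvSqueeze_cons_ne c _ (by simpa using hc)]


theorem pv_rstrip_rev (s : List Char) :
    (List.dropWhile pvInD s.reverse).reverse = pvRstrip s := by
  induction s with
  | nil => rfl
  | cons c t ih =>
    rw [List.reverse_cons, List.dropWhile_append]
    rw [pvRstrip_cons]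
    cases he : (List.dropWhile pvInD t.reverse).isEmpty
    · have hne : pvRstrip t ≠ [] := by
        rw [← ih]
        simp only [ne_eq, List.reverse_eq_nil_iff]
        simpa using he
      simp only [Bool.false_eq_true, if_false, List.reverse_append, List.reverse_cons,
        List.reverse_nil, List.nil_append, ih]
      rw [if_neg (by simp [hne])]
      simp
    · have hrt : pvRstrip t = [] := by
        rw [← ih]
        simp only [List.reverse_eq_nil_iff]
        simpa using he
      simp only [if_true, hrt]
      cases hd : pvInD c
      · simp [hd]
      · simp [hd]

theorem pv_stripChars_eq (s : List Char) :
    PySem.Chars.stripChars s ['-', '_'] = pvStripD s := by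
  have hp : (fun c => List.contains ['-', '_'] c) = pvInD := by
    funext c
    simp only [pvInD, List.contains_cons, List.contains_nil, Bool.or_false]
  show (List.dropWhile _ (List.dropWhile _ s).reverse).reverse = _
  rw [hp, pv_rstrip_rev]
  rfl


theorem pv_prefixDD (c : Char) (t : List Char) :
    List.isPrefixOf ['-', '-'] (c :: t) = (c == '-' && t.head? == some '-') := by
  cases t with
  | nil => simp [List.isPrefixOf]
  | cons d u => simp [List.isPrefixOf, BEq.comm]


theorem pv_replace_go (fuel : Nat) (l acc : List Char) (h : l.length ≤ fuel) :
    PySem.Chars.replace.go ['-', '-'] ['-'] fuel l acc = acc.reverse ++ pvRepl2 l := by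
  induction fuel generalizing l acc with
  | zero =>
    have : l = [] := by
      cases l with
      | nil => rfl
      | cons c t => simp at h
    subst this
    rw [PySem.Chars.replace.go]
    simp [pvRepl2]
  | succ fuel ih =>
    cases l with
    | nil =>
      rw [PySem.Chars.replace.go]
      simp [pvRepl2]
      omega
    | cons c t =>
      rw [PySem.Chars.replace.go]
      rw [pv_prefixDD]
      cases t with
      | nil =>
        rw [if_neg (by simp)]
        rw [ih [] (c :: acc) (by simp)]
        simp [pvRepl2]
      | cons d u =>
        by_cases hdd : (c == '-' && d == '-') = true
        · rw [if_pos (by simpa using hdd)]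
          have hc : c = '-' := by simp at hdd; exact hdd.1
          have hd : d = '-' := by simp at hdd; exact hdd.2
          subst hc; subst hd
          rw [show List.drop (['-', '-'] : List Char).length ('-' :: '-' :: u) = u from rfl]
          rw [show (['-'] : List Char).reverse ++ acc = '-' :: acc from by simp]
          rw [ih u (('-' : Char) :: acc) (by simp only [List.length_cons] at h ⊢; omega)]
          simp [pvRepl2]
        · rw [if_neg (by simpa using hdd)]
          rw [ih (d :: u) (c :: acc) (by simp only [List.length_cons] at h ⊢; omega)]
          have : pvRepl2 (c :: d :: u) = c :: pvRepl2 (d :: u) := by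
            rw [pvRepl2, if_neg hdd]
          rw [this]
          simp


theorem pv_replace_eq (s : List Char) : PySem.Chars.replace s ['-', '-'] ['-'] = pvRepl2 s := by
  show PySem.Chars.replace.go _ _ _ _ _ = _
  rw [pv_replace_go s.length s [] le_rfl]
  rfl


theorem pv_isIn_eq (s : List Char) : PySem.Chars.isIn ['-', '-'] s = pvHasDD s := by
  have go : ∀ (l : List Char) (k : Nat),
      (PySem.Chars.find.go ['-', '-'] l k != -1) = pvHasDD l := by
    intro l
    induction l with
    | nil =>
      intro k
      rw [PySem.Chars.find.go]
      simp [pvHasDD]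
    | cons c t ih =>
      intro k
      rw [PySem.Chars.find.go]
      rw [pv_prefixDD]
      by_cases hdd : (c == '-' && t.head? == some '-') = true
      · rw [if_pos hdd]
        simp only [pvHasDD, hdd, Bool.true_or]
        simp
      · rw [if_neg hdd, ih (k + 1)]
        simp only [pvHasDD]
        simp_all
  show (PySem.Chars.find.go _ _ _ != -1) = _
  exact go s 0


theorem pv_noDD (s : List Char) (h : pvHasDD s = false) : pvSqueeze s = s := by
  induction s with
  | nil => rfl
  | cons c t ih =>
    simp only [pvHasDD, Bool.or_eq_false_iff] at h
    simp only [pvSqueeze, h.1, Bool.false_eq_true, if_false]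
    rw [ih h.2]


theorem pvRepl2_len (s : List Char) (h : pvHasDD s = true) : (pvRepl2 s).length < s.length := by
  induction s using pvRepl2.induct with
  | case1 => simp [pvHasDD] at h
  | case2 c => simp [pvHasDD] at h
  | case3 c d t hdd ih =>
    rw [pvRepl2, if_pos hdd]
    have hle : ∀ u : List Char, (pvRepl2 u).length ≤ u.length := by
      intro u
      induction u using pvRepl2.induct with
      | case1 => simp [pvRepl2]
      | case2 e => simp [pvRepl2]
      | case3 e f v h2 ih2 =>
        rw [pvRepl2, if_pos h2]
        simpa using Nat.le_trans ih2 (by simp)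
      | case4 e f v h2 ih2 =>
        rw [pvRepl2, if_neg h2]
        simpa using ih2
    have := hle t
    simp only [List.length_cons]
    omega
  | case4 c d t hdd ih =>
    rw [pvRepl2, if_neg hdd]
    have hDD : pvHasDD (d :: t) = true := by
      simp only [pvHasDD] at h
      rcases Bool.or_eq_true_iff.1 h with h1 | h1
      · exfalso
        simp only [List.head?_cons, Option.some.injEq, Bool.and_eq_true, beq_iff_eq] at h1 hdd
        simp_all
      · exact h1
    have := ih hDD
    simp only [List.length_cons] at this ⊢
    omega


theorem pvSqueeze_repl2 (s : List Char) : pvSqueeze (pvRepl2 s) = pvSqueeze s := by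
  have congrLem : ∀ (c : Char) (X Y : List Char), pvSqueeze X = pvSqueeze Y →
      pvSqueeze (c :: X) = pvSqueeze (c :: Y) := by
    intro c X Y hXY
    by_cases hc : (c == '-') = true
    · have : c = '-' := by simpa using hc
      subst this
      rw [pvSqueeze_dash, pvSqueeze_dash, hXY]
    · rw [pvSqueeze_cons_ne c X (by simpa using hc), pvSqueeze_cons_ne c Y (by simpa using hc), hXY]
  induction s using pvRepl2.induct with
  | case1 => rfl
  | case2 c => rfl
  | case3 c d t hdd ih =>
    have hc : c = '-' := by simp at hdd; exact hdd.1
    have hd : d = '-' := by simp at hdd; exact hdd.2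
    subst hc; subst hd
    rw [pvRepl2, if_pos (by simp)]
    rw [pvSqueeze_dash, ih]
    have : pvSqueeze ('-' :: '-' :: t) = pvSqueeze ('-' :: t) := by
      simp [pvSqueeze]
    rw [this, pvSqueeze_dash]
  | case4 c d t hdd ih =>
    rw [pvRepl2, if_neg hdd]
    exact congrLem c _ _ ih


theorem pvCollapse_eq (fuel : Nat) (s : List Char) (h : s.length ≤ fuel) :
    pvCollapse fuel s = pvSqueeze s := by
  induction fuel generalizing s with
  | zero =>
    have : s = [] := by
      cases s with
      | nil => rfl
      | cons c t => simp at h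
    subst this
    rfl
  | succ fuel ih =>
    rw [pvCollapse]
    rw [pv_isIn_eq]
    cases hdd : pvHasDD s
    · simp only [Bool.false_eq_true, if_false]
      exact (pv_noDD s hdd).symm
    · simp only [if_true]
      rw [pv_replace_eq]
      rw [ih (pvRepl2 s) (by have := pvRepl2_len s hdd; omega)]
      exact pvSqueeze_repl2 s


-- ===== VERDICT (by name: the statement is the Claim_ definition above) =====
theorem normalize_account_name_py_spec : Claim_equal_normalize_account_name_py := by
  intro value _
  unfold Spec_normalize_account_name_py normalize_account_name_py normalize_account_name_py_alt
  dsimp only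
  have hB : PySem.Chars.stripChars ((PySem.Chars.strip value.toList).foldl
      (fun (st : List Char × Bool) c =>
        if PySem.Chars.isalnum c || c == '_' then
          ((if st.2 && !st.1.isEmpty then st.1 ++ ['-'] else st.1) ++ [PySem.Chars.lowerChar c], false)
        else if c == '-' || c == '.' || c == ' ' then (st.1, true)
        else st) ([], false)).1 ['-', '_'] =
      pvSqueeze (pvStripD ((PySem.Chars.strip value.toList).flatMap pvFA)) := by
    rw [pv_machine _ [] false]
    simp only [List.nil_append, List.isEmpty_nil, Bool.not_true]
    rw [pvS_eq, pv_stripChars_eq, pvM]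
  cases hre : (PySem.Chars.strip value.toList).isEmpty
  · simp only [Bool.false_eq_true, if_false]
    rw [hB, pv_foldlA _ [], List.nil_append, pv_stripChars_eq, pvCollapse_eq _ _ le_rfl]
  · have hnil : PySem.Chars.strip value.toList = [] := by simpa using hre
    simp only [if_true]
    rw [hB, hnil]
    rfl
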